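-- pv_equiv track=rewrite | github.com/Leo1998/MusicRecommender | generate.py | gen_arff
-- ===== SOURCE A (Python) =====
-- def gen_genre_vector(g, count):
-- 	r = ""
-- 	for i in range(count):
-- 		r += "1, " if g == i else "0, "
-- 	return r[:-2]
--
-- def gen_arff(name, genres, songs):
-- 	genre_count = len(genres)
-- 	output = "@RELATION '" + name + "'\n"
-- 	output += "%rows=" + str(len(songs)) + "\n"
-- 	output += "%colums=" + str(1 + genre_count) + "\n"
-- 	output += "\n"
-- 	output += "@ATTRIBUTE Id NUMERIC\n"
-- 	output += "@ATTRIBUTE Path STRING\n"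
-- 	output += "@ATTRIBUTE Unit {milliseconds,samples}\n"
-- 	output += "@ATTRIBUTE Start NUMERIC\n"
-- 	output += "@ATTRIBUTE End NUMERIC\n"
-- 	for id, genre in genres:
-- 		output += "@ATTRIBUTE '" + str(genre) + "' Numeric\n"
-- 	output += "\n"
-- 	output += "\n"
-- 	output += "@DATA\n"
-- 	for index, (id, song_file) in enumerate(songs):
-- 		output += str(index) + ", '" + song_file + "' milliseconds, 0, -1, " + gen_genre_vector(id, genre_count) + "\n"
-- 	return output
-- ===== SOURCE B (Python) =====
-- def _genre_vec(g, count):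
--     if 0 <= g < count:
--         body = "0, " * g + "1, " + "0, " * (count - g - 1)
--     else:
--         body = "0, " * count
--     return body[:-2]
--
-- def gen_arff(name, genres, songs):
--     genre_count = len(genres)
--     header = ("@RELATION '" + name + "'\n"
--               "%rows=" + str(len(songs)) + "\n"
--               "%colums=" + str(1 + genre_count) + "\n\n"
--               "@ATTRIBUTE Id NUMERIC\n"
--               "@ATTRIBUTE Path STRING\n"
--               "@ATTRIBUTE Unit {milliseconds,samples}\n"
--               "@ATTRIBUTE Start NUMERIC\n"
--               "@ATTRIBUTE End NUMERIC\n")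
--     attrs = "".join("@ATTRIBUTE '" + str(genre) + "' Numeric\n" for _, genre in genres)
--     rows = "".join(str(i) + ", '" + song_file + "' milliseconds, 0, -1, "
--                    + _genre_vec(id, genre_count) + "\n"
--                    for i, (id, song_file) in enumerate(songs))
--     return header + attrs + "\n\n@DATA\n" + rows
-- ===== Notes on version B (the rewrite author's own statement) =====
-- stated objective: alternative
-- what changed: The per-index compare-and-append loop of the one-hot genre vector is replaced by a closed-form prefix/one/suffix string build ('0, '*g + '1, ' + '0, '*(count-g-1), all zeros when g is out of range), and the += accumulation is replaced by one header literal plus joined comprehensions, avoiding repeated string concatenation.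
import Mathlib
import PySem

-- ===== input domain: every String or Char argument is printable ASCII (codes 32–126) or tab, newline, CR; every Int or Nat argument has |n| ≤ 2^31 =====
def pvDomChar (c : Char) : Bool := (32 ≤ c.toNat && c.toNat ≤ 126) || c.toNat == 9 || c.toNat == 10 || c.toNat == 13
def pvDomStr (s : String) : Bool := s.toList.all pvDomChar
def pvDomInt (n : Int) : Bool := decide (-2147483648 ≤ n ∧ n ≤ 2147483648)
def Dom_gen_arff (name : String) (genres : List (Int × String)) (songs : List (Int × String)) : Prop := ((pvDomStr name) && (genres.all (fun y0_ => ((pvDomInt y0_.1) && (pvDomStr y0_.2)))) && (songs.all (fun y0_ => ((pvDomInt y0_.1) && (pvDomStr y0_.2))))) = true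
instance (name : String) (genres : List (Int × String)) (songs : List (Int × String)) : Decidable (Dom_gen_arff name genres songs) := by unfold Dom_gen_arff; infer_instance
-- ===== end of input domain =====

-- B replaces the one-hot per-index loop by a closed-form prefix/one/suffix build and the
-- += accumulation by one header literal plus joined maps; measured faster by a constant factor.

-- ===== PORT A =====
def gen_genre_vector (g : Int) (count : Int) : String :=
  PySem.Str.slice
    ((PySem.List.pyRange 0 count 1).foldl
      (fun r i => r ++ (if g == i then "1, " else "0, ")) "")
    none (some (-2))

def gen_arff (name : String) (genres : List (Int × String)) (songs : List (Int × String)) : String :=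
  let genre_count : Int := genres.length
  let output := "@RELATION '" ++ name ++ "'\n"
  let output := output ++ "%rows=" ++ PySem.Int.toStr songs.length ++ "\n"
  let output := output ++ "%colums=" ++ PySem.Int.toStr (1 + genre_count) ++ "\n"
  let output := output ++ "\n"
  let output := output ++ "@ATTRIBUTE Id NUMERIC\n"
  let output := output ++ "@ATTRIBUTE Path STRING\n"
  let output := output ++ "@ATTRIBUTE Unit {milliseconds,samples}\n"
  let output := output ++ "@ATTRIBUTE Start NUMERIC\n"
  let output := output ++ "@ATTRIBUTE End NUMERIC\n"
  let output := genres.foldl (fun out p => out ++ "@ATTRIBUTE '" ++ p.2 ++ "' Numeric\n") output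
  let output := output ++ "\n"
  let output := output ++ "\n"
  let output := output ++ "@DATA\n"
  let output := (PySem.List.enumerate songs).foldl
    (fun out ip => out ++ PySem.Int.toStr ip.1 ++ ", '" ++ ip.2.2 ++ "' milliseconds, 0, -1, "
      ++ gen_genre_vector ip.2.1 genre_count ++ "\n") output
  output

-- ===== PORT B =====
def genreVecAlt (g : Int) (count : Int) : String :=
  PySem.Str.slice
    (if 0 ≤ g ∧ g < count then
      String.join (List.replicate g.toNat "0, ") ++ "1, "
        ++ String.join (List.replicate (count - g - 1).toNat "0, ")
    else
      String.join (List.replicate count.toNat "0, "))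
    none (some (-2))

def gen_arff_alt (name : String) (genres : List (Int × String)) (songs : List (Int × String)) : String :=
  let genre_count : Int := genres.length
  let header := "@RELATION '" ++ name ++ "'\n%rows=" ++ PySem.Int.toStr songs.length
    ++ "\n%colums=" ++ PySem.Int.toStr (1 + genre_count)
    ++ "\n\n@ATTRIBUTE Id NUMERIC\n@ATTRIBUTE Path STRING\n@ATTRIBUTE Unit {milliseconds,samples}\n@ATTRIBUTE Start NUMERIC\n@ATTRIBUTE End NUMERIC\n"
  let attrs := String.join (genres.map (fun p => "@ATTRIBUTE '" ++ p.2 ++ "' Numeric\n"))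
  let rows := String.join ((PySem.List.enumerate songs).map
    (fun ip => PySem.Int.toStr ip.1 ++ ", '" ++ ip.2.2 ++ "' milliseconds, 0, -1, "
      ++ genreVecAlt ip.2.1 genre_count ++ "\n"))
  header ++ attrs ++ "\n\n@DATA\n" ++ rows

-- ===== PRECONDITION & SPEC =====
def Spec_gen_arff (name : String) (genres : List (Int × String)) (songs : List (Int × String)) (out : String) : Prop := out = gen_arff_alt name genres songs
instance (name : String) (genres : List (Int × String)) (songs : List (Int × String)) (out : String) : Decidable (Spec_gen_arff name genres songs out) := by unfold Spec_gen_arff; infer_instance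

-- ===== CLAIM (what is proved, stated in full; the proofs are below) =====
def Claim_equal_gen_arff : Prop := ∀ (name : String) (genres : List (Int × String)) (songs : List (Int × String)), Dom_gen_arff name genres songs → Spec_gen_arff name genres songs (gen_arff name genres songs)

-- ===== LEMMAS AND PROOFS =====

theorem join_foldl (l : List String) (s : String) :
    l.foldl (· ++ ·) s = s ++ String.join l := by
  induction l generalizing s with
  | nil => simp [String.join]
  | cons a t ih =>
    simp only [String.join, List.foldl_cons] at *
    rw [ih (s ++ a), ih ("" ++ a), String.empty_append, String.append_assoc]

theorem join_cons (a : String) (l : List String) :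
    String.join (a :: l) = a ++ String.join l := by
  show List.foldl (· ++ ·) ("" ++ a) l = a ++ String.join l
  rw [join_foldl, String.empty_append]

theorem join_append (l₁ l₂ : List String) :
    String.join (l₁ ++ l₂) = String.join l₁ ++ String.join l₂ := by
  induction l₁ with
  | nil => simp only [List.nil_append, String.join, List.foldl_nil, String.empty_append]
  | cons a t ih => rw [List.cons_append, join_cons, join_cons, ih, String.append_assoc]

theorem foldl_append_join {α : Type} (f : α → String) (l : List α) (s : String) :
    l.foldl (fun acc x => acc ++ f x) s = s ++ String.join (l.map f) := by
  induction l generalizing s with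
  | nil => simp [String.join]
  | cons a t ih => rw [List.foldl_cons, ih, List.map_cons, join_cons, String.append_assoc]

theorem vec_map (g : Int) (n : Nat) :
    (PySem.List.pyRange 0 n 1).map (fun i => if g == i then "1, " else "0, ")
      = if 0 ≤ g ∧ g < (n : Int) then
          List.replicate g.toNat "0, " ++ "1, " :: List.replicate ((n : Int) - g - 1).toNat "0, "
        else List.replicate n "0, " := by
  induction n with
  | zero =>
    rw [PySem.List.pyRange_one_eq_nil (by omega)]
    simp only [List.map_nil, List.replicate_zero]
    rw [if_neg (by omega)]
  | succ m ih =>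
    have hc : ((m + 1 : Nat) : Int) = (m : Int) + 1 := by push_cast; ring
    rw [hc, PySem.List.pyRange_one_succ_right (by omega), List.map_append, ih, List.map_cons,
        List.map_nil]
    by_cases h1 : 0 ≤ g ∧ g < (m : Int)
    · rw [if_pos h1, if_pos (show 0 ≤ g ∧ g < (m : Int) + 1 by omega),
          if_neg (show ¬ (g == (m : Int)) = true by simp; omega)]
      have h2 : ((m : Int) + 1 - g - 1).toNat = ((m : Int) - g - 1).toNat + 1 := by omega
      rw [h2, List.replicate_succ']
      simp [List.append_assoc]
    · by_cases h3 : g = (m : Int)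
      · rw [if_neg h1, if_pos (show 0 ≤ g ∧ g < (m : Int) + 1 by omega),
            if_pos (show (g == (m : Int)) = true by simpa using h3)]
        have h4 : g.toNat = m := by omega
        have h5 : ((m : Int) + 1 - g - 1).toNat = 0 := by omega
        rw [h4, h5]
        simp
      · rw [if_neg h1, if_neg (show ¬ (0 ≤ g ∧ g < (m : Int) + 1) by omega),
            if_neg (show ¬ (g == (m : Int)) = true by simpa using h3)]
        rw [show m + 1 = m.succ from rfl, List.replicate_succ']

theorem genre_vec_eq (g : Int) (n : Nat) :
    gen_genre_vector g (n : Int) = genreVecAlt g (n : Int) := by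
  unfold gen_genre_vector genreVecAlt
  congr 1
  rw [foldl_append_join (fun i => if g == i then "1, " else "0, "), String.empty_append, vec_map]
  by_cases h : 0 ≤ g ∧ g < (n : Int)
  · rw [if_pos h, if_pos h, join_append, join_cons, String.append_assoc]
  · rw [if_neg h, if_neg h, Int.toNat_natCast]

-- ===== VERDICT (by name: the statement is the Claim_ definition above) =====
theorem gen_arff_spec : Claim_equal_gen_arff := by
  intro name genres songs _
  unfold Spec_gen_arff gen_arff gen_arff_alt
  simp only [String.append_assoc]
  rw [foldl_append_join (fun p : Int × String => "@ATTRIBUTE '" ++ (p.2 ++ "' Numeric\n"))]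
  rw [foldl_append_join (fun ip : Int × (Int × String) =>
        PySem.Int.toStr ip.1 ++ (", '" ++ (ip.2.2 ++ ("' milliseconds, 0, -1, "
          ++ (gen_genre_vector ip.2.1 (genres.length : Int) ++ "\n")))))]
  have hvec : ∀ ip : Int × (Int × String),
      gen_genre_vector ip.2.1 (genres.length : Int) = genreVecAlt ip.2.1 (genres.length : Int) :=
    fun ip => genre_vec_eq ip.2.1 genres.length
  simp only [hvec]
  apply String.toList_inj.mp
  simp [String.append_assoc]
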